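-- pv_equiv track=rewrite | github.com/Joki44/bt | permission_card.py | permission_card
-- ===== SOURCE A (Python) =====
-- def permission_card(hand, trump, first_card):
--     permission_card_first_card = False
--     permission_card_trump = False
--     permission = []
--
--     for card in hand:
--         c = card[1]
--         if c == '0':
--             c = card[2]
--         fc = first_card[1]
--         if fc == '0':
--             fc = first_card[2]
--
--         if c == fc:
--             permission.append(card)
--             permission_card_first_card = True
--             permission_card_trump = True
--
--     if permission_card_first_card == False:
--         for card in hand:
--             c = card[1]
--             if c == '0':
--                 c = card[2]
--             t = trump[1]
--             if t == '0':
--                 t = trump[2]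
--
--             if c == t:
--                 permission.append(card)
--                 permission_card_trump = True
--
--     if permission_card_trump == False:
--         for card in hand:
--             permission.append(card)
--
--     return permission
-- ===== SOURCE B (Python) =====
-- def _suit(card):
--     c = card[1]
--     if c == '0':
--         c = card[2]
--     return c
--
-- def permission_card(hand, trump, first_card):
--     groups = {}
--     for card in hand:
--         groups.setdefault(_suit(card), []).append(card)
--     first_suit = _suit(first_card)
--     trump_suit = _suit(trump)
--     if first_suit in groups:
--         return groups[first_suit]
--     if trump_suit in groups:
--         return groups[trump_suit]
--     return list(hand)
-- ===== Notes on version B (the rewrite author's own statement) =====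
-- stated objective: idiomatic
-- what changed: One grouping pass builds a suit->cards dict (setdefault) with a suit-extraction helper, then the answer is two O(1) lookups (first_card's suit, else trump's suit, else a copy of the hand) instead of A's three separate conditional scans with boolean flags. Pre_ excludes malformed card strings (length<2, or <3 with '0' at index 1) on which indexing raises; on a few of those (empty hand, or malformed trump when first_card's suit is in hand) A still returns while B's eager suit extraction raises.
-- outside the precondition, e.g. on permission_card([], '', ''): A returns [], B raises IndexError; on permission_card(['H5'], 'X', 'A5'): A returns ['H5'], B raises IndexError
import Mathlib
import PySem

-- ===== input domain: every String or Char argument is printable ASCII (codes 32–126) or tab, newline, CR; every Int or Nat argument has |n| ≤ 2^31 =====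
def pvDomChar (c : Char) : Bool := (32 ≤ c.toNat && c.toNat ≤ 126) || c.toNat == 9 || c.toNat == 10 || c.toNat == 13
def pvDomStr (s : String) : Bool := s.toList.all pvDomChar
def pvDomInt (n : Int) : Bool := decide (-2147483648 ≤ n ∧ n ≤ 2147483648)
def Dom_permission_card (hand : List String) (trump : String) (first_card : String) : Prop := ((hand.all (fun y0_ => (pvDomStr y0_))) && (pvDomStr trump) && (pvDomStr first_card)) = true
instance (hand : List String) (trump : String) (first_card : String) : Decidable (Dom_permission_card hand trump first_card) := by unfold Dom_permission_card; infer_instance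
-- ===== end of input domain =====

-- B replaces A's three conditional scans with one dict-grouping pass plus two lookups (idiomatic; same O(n) cost).


-- ===== PORT A =====
-- Literal port of A: first loop collects cards matching first_card's suit (setting both flags),
-- a second loop over trump's suit if the first found nothing, and a final copy loop if neither did.
-- card[1]/card[2] are PySem.Str.pyGet?; the .getD ' ' default is only reached where Python raises
-- IndexError, which Pre_permission_card excludes.
def permission_card (hand : List String) (trump : String) (first_card : String) : List String :=
  let s1 := hand.foldl (fun (st : Bool × Bool × List String) card =>
      let c := (PySem.Str.pyGet? card 1).getD ' '
      let c := if c == '0' then (PySem.Str.pyGet? card 2).getD ' ' else c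
      let fc := (PySem.Str.pyGet? first_card 1).getD ' '
      let fc := if fc == '0' then (PySem.Str.pyGet? first_card 2).getD ' ' else fc
      if c == fc then (true, true, st.2.2 ++ [card]) else st)
    (false, false, [])
  let s2 :=
    if s1.1 = false then
      hand.foldl (fun (st : Bool × Bool × List String) card =>
        let c := (PySem.Str.pyGet? card 1).getD ' '
        let c := if c == '0' then (PySem.Str.pyGet? card 2).getD ' ' else c
        let t := (PySem.Str.pyGet? trump 1).getD ' '
        let t := if t == '0' then (PySem.Str.pyGet? trump 2).getD ' ' else t
        if c == t then (st.1, true, st.2.2 ++ [card]) else st) s1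
    else s1
  if s2.2.1 = false then hand.foldl (fun acc card => acc ++ [card]) s2.2.2
  else s2.2.2

-- ===== PORT B =====
-- B's helper _suit(card): card[1], or card[2] when card[1] == '0' (same .getD ' ' totalisation).
def pcSuit (s : String) : Char :=
  let c := (PySem.Str.pyGet? s 1).getD ' '
  if c == '0' then (PySem.Str.pyGet? s 2).getD ' ' else c

-- Literal port of B: one grouping pass (dict setdefault-append = Dict.modify with default []),
-- then lookup first_card's suit, else trump's suit, else the whole hand.
def permission_card_alt (hand : List String) (trump : String) (first_card : String) : List String :=
  let groups := hand.foldl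
    (fun (g : PySem.Dict Char (List String)) card => g.modify (pcSuit card) [] (· ++ [card]))
    PySem.Dict.empty
  let first_suit := pcSuit first_card
  let trump_suit := pcSuit trump
  match groups.get? first_suit with
  | some l => l
  | none =>
    match groups.get? trump_suit with
    | some l => l
    | none => hand

-- ===== PRECONDITION & SPEC =====
-- Pre_ excludes malformed card strings (length < 2, or < 3 when the char at index 1 is '0'), on which
-- indexing raises IndexError; on some of them (empty hand, or a malformed trump when first_card's suit
-- is already in hand) A still returns while B's eager suit extraction raises.
def pcWF (s : String) : Bool :=
  decide (2 ≤ s.toList.length) && (!(s.toList[1]? == some '0') || decide (3 ≤ s.toList.length))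

def Pre_permission_card (hand : List String) (trump : String) (first_card : String) : Prop :=
  (pcWF first_card && pcWF trump && hand.all pcWF) = true

instance (hand : List String) (trump : String) (first_card : String) : Decidable (Pre_permission_card hand trump first_card) := by
  unfold Pre_permission_card; infer_instance

def pvWitness_permission_card : List String × String × String := (["H5", "S9", "S105"], "H2", "S3")

def Spec_permission_card (hand : List String) (trump : String) (first_card : String) (out : List String) : Prop := out = permission_card_alt hand trump first_card
instance (hand : List String) (trump : String) (first_card : String) (out : List String) : Decidable (Spec_permission_card hand trump first_card out) := by unfold Spec_permission_card; infer_instance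

-- ===== CLAIM (what is proved, stated in full; the proofs are below) =====
def Claim_equal_permission_card : Prop := ∀ (hand : List String) (trump : String) (first_card : String), Dom_permission_card hand trump first_card → Pre_permission_card hand trump first_card → Spec_permission_card hand trump first_card (permission_card hand trump first_card)

-- ===== LEMMAS AND PROOFS =====

-- A's first loop from any state: flags become true iff some card matches, matches are appended in order.
theorem pc_loop1 (hand : List String) (fs : Char) (b1 b2 : Bool) (acc : List String) :
    hand.foldl (fun (st : Bool × Bool × List String) card =>
        if pcSuit card == fs then (true, true, st.2.2 ++ [card]) else st) (b1, b2, acc)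
    = (b1 || hand.any (fun c => pcSuit c == fs), b2 || hand.any (fun c => pcSuit c == fs),
       acc ++ hand.filter (fun c => pcSuit c == fs)) := by
  induction hand generalizing b1 b2 acc with
  | nil => simp
  | cons x xs ih =>
    simp only [List.foldl_cons]
    by_cases h : pcSuit x = fs
    · rw [if_pos (by simp [h]), ih]; simp [h]
    · have hb : (pcSuit x == fs) = false := by simp [h]
      rw [if_neg (by simp [h]), ih]; simp [hb]

-- A's second loop from any state: only the trump flag is set.
theorem pc_loop2 (hand : List String) (ts : Char) (b1 b2 : Bool) (acc : List String) :
    hand.foldl (fun (st : Bool × Bool × List String) card =>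
        if pcSuit card == ts then (st.1, true, st.2.2 ++ [card]) else st) (b1, b2, acc)
    = (b1, b2 || hand.any (fun c => pcSuit c == ts),
       acc ++ hand.filter (fun c => pcSuit c == ts)) := by
  induction hand generalizing b1 b2 acc with
  | nil => simp
  | cons x xs ih =>
    simp only [List.foldl_cons]
    by_cases h : pcSuit x = ts
    · rw [if_pos (by simp [h]), ih]; simp [h]
    · have hb : (pcSuit x == ts) = false := by simp [h]
      rw [if_neg (by simp [h]), ih]; simp [hb]

-- B's grouping dict, looked up at k, is exactly the in-order filter of the hand by suit k (as Option).
theorem pc_groups (hand : List String) (k : Char) :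
    (hand.foldl
      (fun (g : PySem.Dict Char (List String)) card => g.modify (pcSuit card) [] (· ++ [card]))
      PySem.Dict.empty).get? k
    = if hand.any (fun c => pcSuit c == k) then some (hand.filter (fun c => pcSuit c == k)) else none := by
  set G := hand.foldl
      (fun (g : PySem.Dict Char (List String)) card => g.modify (pcSuit card) [] (· ++ [card]))
      PySem.Dict.empty with hG
  have hcont : G.contains k = hand.any (fun c => pcSuit c == k) := by
    rw [PySem.Dict.contains_eq_decide_mem_keys, hG, PySem.Dict.keys_foldl_modify_key hand pcSuit [] (fun _ card => (· ++ [card]))]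
    apply Bool.eq_iff_iff.mpr
    simp [PySem.Set.mem_update, PySem.Dict.keys_empty, List.any_eq_true]
  have hgetD : G.getD k [] = hand.filter (fun c => pcSuit c == k) := by
    have hmap : G = (hand.map (fun c => (pcSuit c, c))).foldl
        (fun (d : PySem.Dict Char (List String)) p => d.modify p.1 [] (· ++ [p.2]))
        PySem.Dict.empty := by
      rw [hG, List.foldl_map]
    rw [hmap, PySem.Dict.getD_foldl_modify_append]
    simp [List.filter_map, Function.comp_def, List.map_map, PySem.Dict.getD_empty]
  by_cases hany : hand.any (fun c => pcSuit c == k)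
  · rw [if_pos hany]
    have hiss : (G.get? k).isSome := by
      rw [← PySem.Dict.contains_eq_isSome_get?, hcont, hany]
    cases hg : G.get? k with
    | none => rw [hg] at hiss; simp at hiss
    | some v =>
      rw [PySem.Dict.getD_eq_get?_getD, hg] at hgetD
      simpa using hgetD ▸ rfl
  · rw [if_neg hany]
    exact (PySem.Dict.get?_eq_none_iff_contains G k).mpr (by rw [hcont]; simpa using hany)

-- ===== VERDICT (by name: the statement is the Claim_ definition above) =====
theorem permission_card_spec : Claim_equal_permission_card := by
  intro hand trump first_card _ _
  show permission_card hand trump first_card = permission_card_alt hand trump first_card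
  -- defeq restatement of both ports with the inline let-chains folded into pcSuit
  change
    ((fun (s2 : Bool × Bool × List String) =>
        if s2.2.1 = false then hand.foldl (fun acc card => acc ++ [card]) s2.2.2 else s2.2.2)
      ((fun (s1 : Bool × Bool × List String) =>
          if s1.1 = false then
            hand.foldl (fun (st : Bool × Bool × List String) card =>
              if pcSuit card == pcSuit trump then (st.1, true, st.2.2 ++ [card]) else st) s1
          else s1)
        (hand.foldl (fun (st : Bool × Bool × List String) card =>
            if pcSuit card == pcSuit first_card then (true, true, st.2.2 ++ [card]) else st)
          (false, false, []))))
    = ((fun (groups : PySem.Dict Char (List String)) =>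
          match groups.get? (pcSuit first_card) with
          | some l => l
          | none =>
            match groups.get? (pcSuit trump) with
            | some l => l
            | none => hand)
        (hand.foldl (fun (g : PySem.Dict Char (List String)) card =>
            g.modify (pcSuit card) [] (· ++ [card])) PySem.Dict.empty))
  rw [pc_loop1]
  beta_reduce
  rw [pc_loop2, pc_groups hand (pcSuit first_card), pc_groups hand (pcSuit trump)]
  by_cases h1 : hand.any (fun c => pcSuit c == pcSuit first_card)
  · simp [h1]
  · have hF : List.filter (fun c => pcSuit c == pcSuit first_card) hand = [] :=
      List.filter_eq_nil_iff.mpr (fun a ha => by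
        have := List.any_eq_false.mp (Bool.eq_false_iff.mpr h1) a ha; simpa using this)
    by_cases h2 : hand.any (fun c => pcSuit c == pcSuit trump)
    · simp [h1, h2, hF]
    · have hT : List.filter (fun c => pcSuit c == pcSuit trump) hand = [] :=
        List.filter_eq_nil_iff.mpr (fun a ha => by
          have := List.any_eq_false.mp (Bool.eq_false_iff.mpr h2) a ha; simpa using this)
      have h1' : (hand.any fun c => pcSuit c == pcSuit first_card) = false := Bool.eq_false_iff.mpr h1
      have h2' : (hand.any fun c => pcSuit c == pcSuit trump) = false := Bool.eq_false_iff.mpr h2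
      simp only [h1', h2', hF, hT]
      show List.foldl (fun acc card => acc ++ [card]) ([] ++ []) hand = hand
      rw [PySem.List.foldl_append_singleton_eq_self]
      simp
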